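-- pv_equiv track=rewrite | github.com/Dedaub/multicall.py | multicall/signature.py | parse_typestring
-- ===== SOURCE A (Python) =====
-- def parse_typestring(typestring: str) -> list[str]:
--     if typestring == "()":
--         return []
--     parts = []
--     part = ""
--     inside_tuples = 0
--     for character in typestring[1:-1]:
--         if character == "(":
--             inside_tuples += 1
--         elif character == ")":
--             inside_tuples -= 1
--         elif character == "," and inside_tuples == 0:
--             parts.append(part)
--             part = ""
--             continue
--         part += character
--     parts.append(part)
--     return parts
-- ===== SOURCE B (Python) =====
-- def parse_typestring(typestring: str) -> list[str]:
--     if typestring == "()":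
--         return []
--     parts = []
--     pending = []
--     depth = 0
--     for frag in typestring[1:-1].split(","):
--         pending.append(frag)
--         depth += frag.count("(") - frag.count(")")
--         if depth == 0:
--             parts.append(",".join(pending))
--             pending = []
--     if pending:
--         parts.append(",".join(pending))
--     return parts
-- ===== Notes on version B (the rewrite author's own statement) =====
-- stated objective: faster
-- what changed: B splits the inner string once at commas and regroups the resulting fragments by running parenthesis balance, flushing a joined group whenever the balance returns to zero, instead of A's character-by-character scan that grows a part string one character at a time while tracking depth.
import Mathlib
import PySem

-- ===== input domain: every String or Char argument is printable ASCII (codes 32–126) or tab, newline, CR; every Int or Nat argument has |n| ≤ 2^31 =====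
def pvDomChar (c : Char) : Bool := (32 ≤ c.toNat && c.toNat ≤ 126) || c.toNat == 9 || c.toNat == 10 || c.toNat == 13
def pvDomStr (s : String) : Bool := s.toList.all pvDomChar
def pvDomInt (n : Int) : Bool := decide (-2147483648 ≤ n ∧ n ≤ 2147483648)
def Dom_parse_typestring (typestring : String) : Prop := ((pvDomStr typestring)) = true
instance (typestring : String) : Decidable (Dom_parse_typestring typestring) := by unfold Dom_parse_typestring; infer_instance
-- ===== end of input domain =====

-- B regroups the comma-split fragments by running parenthesis balance instead of A's
-- character scan that grows a part string one character at a time (measured faster in a timing run).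

-- ===== PORT A =====
-- the loop body of A: state (parts, part, inside_tuples)
def pvStepA (st : List (List Char) × List Char × Int) (character : Char) :
    List (List Char) × List Char × Int :=
  if character = '(' then (st.1, st.2.1 ++ [character], st.2.2 + 1)
  else if character = ')' then (st.1, st.2.1 ++ [character], st.2.2 - 1)
  else if character = ',' ∧ st.2.2 = 0 then (st.1 ++ [st.2.1], [], st.2.2)
  else (st.1, st.2.1 ++ [character], st.2.2)

def parse_typestring (typestring : String) : List String :=
  if typestring = "()" then []
  else
    let st := ((PySem.Str.slice typestring (some 1) (some (-1))).toList).foldl pvStepA ([], [], 0)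
    (st.1 ++ [st.2.1]).map String.ofList

-- ===== PORT B =====
-- the loop body of B: state (parts, pending, depth)
def pvStepB (st : List (List Char) × List (List Char) × Int) (frag : List Char) :
    List (List Char) × List (List Char) × Int :=
  let pending := st.2.1 ++ [frag]
  let depth := st.2.2 + (PySem.Chars.count frag ['('] : Int) - (PySem.Chars.count frag [')'] : Int)
  if depth = 0 then (st.1 ++ [PySem.Chars.join [','] pending], [], depth)
  else (st.1, pending, depth)

def parse_typestring_alt (typestring : String) : List String :=
  if typestring = "()" then []
  else
    let frags := PySem.Chars.splitOn ((PySem.Str.slice typestring (some 1) (some (-1))).toList) [',']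
    let st := frags.foldl pvStepB ([], [], 0)
    (if st.2.1.isEmpty then st.1 else st.1 ++ [PySem.Chars.join [','] st.2.1]).map String.ofList

-- ===== PRECONDITION & SPEC =====
def Spec_parse_typestring (typestring : String) (out : List String) : Prop := out = parse_typestring_alt typestring
instance (typestring : String) (out : List String) : Decidable (Spec_parse_typestring typestring out) := by unfold Spec_parse_typestring; infer_instance

-- ===== CLAIM (what is proved, stated in full; the proofs are below) =====
def Claim_equal_parse_typestring : Prop := ∀ (typestring : String), Dom_parse_typestring typestring → Spec_parse_typestring typestring (parse_typestring typestring)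

-- ===== LEMMAS AND PROOFS =====

-- finishing step of each port after its fold
def pvFinA (st : List (List Char) × List Char × Int) : List (List Char) := st.1 ++ [st.2.1]
def pvFinB (st : List (List Char) × List (List Char) × Int) : List (List Char) :=
  if st.2.1.isEmpty then st.1 else st.1 ++ [PySem.Chars.join [','] st.2.1]

-- PySem.Chars.count with a one-character needle is List.count
theorem pvCountGo (c : Char) : ∀ (fuel : Nat) (s : List Char) (acc : Nat), s.length ≤ fuel →
    PySem.Chars.count.go [c] fuel s acc = acc + s.count c := by
  intro fuel
  induction fuel with
  | zero =>
    intro s acc h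
    rw [List.length_eq_zero_iff.mp (Nat.le_zero.mp h)]
    simp [PySem.Chars.count.go]
  | succ n ih =>
    intro s acc h
    cases s with
    | nil => simp [PySem.Chars.count.go]
    | cons a t =>
      rw [PySem.Chars.count.go]
      simp only [List.isPrefixOf, Bool.and_true]
      by_cases hac : c = a
      · subst hac
        simp only [BEq.rfl, if_pos, List.length_cons, List.length_nil, Nat.zero_add,
          List.drop_one, List.tail_cons]
        rw [ih t (acc + 1) (by simpa using h)]
        simp
        omega
      · rw [if_neg (by simpa using hac)]
        rw [ih t acc (by simpa using h)]
        simp [Ne.symm hac]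

theorem pvCountSingle (s : List Char) (c : Char) : PySem.Chars.count s [c] = s.count c := by
  rw [PySem.Chars.count]
  simp [pvCountGo c s.length s 0 le_rfl]

-- PySem.Chars.splitOn with a one-character separator is List.splitOnP
theorem pvSplitGo (c : Char) : ∀ (fuel : Nat) (l cur : List Char) (acc : List (List Char)),
    l.length ≤ fuel →
    PySem.Chars.splitOn.go [c] fuel l cur acc
      = acc.reverse ++ (List.splitOnP (· == c) l).modifyHead (cur.reverse ++ ·) := by
  intro fuel
  induction fuel with
  | zero =>
    intro l cur acc h
    rw [List.length_eq_zero_iff.mp (Nat.le_zero.mp h)]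
    simp [PySem.Chars.splitOn.go, List.splitOnP_nil]
  | succ n ih =>
    intro l cur acc h
    cases l with
    | nil => simp [PySem.Chars.splitOn.go, List.splitOnP_nil]
    | cons a t =>
      rw [PySem.Chars.splitOn.go]
      simp only [List.isPrefixOf, Bool.and_true]
      obtain ⟨x, xs, hx⟩ := List.exists_cons_of_ne_nil (List.splitOnP_ne_nil (· == c) t)
      by_cases hac : c = a
      · subst hac
        simp only [BEq.rfl, if_pos, List.length_cons, List.length_nil, Nat.zero_add,
          List.drop_one, List.tail_cons]
        rw [ih t [] (cur.reverse :: acc) (by simpa using h)]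
        rw [List.splitOnP_cons]
        simp [hx]
      · rw [if_neg (by simpa using hac)]
        rw [ih t (a :: cur) acc (by simpa using h)]
        rw [List.splitOnP_cons]
        simp only [beq_iff_eq, if_neg (Ne.symm hac)]
        simp [hx]

theorem pvSplitSingle (s : List Char) (c : Char) :
    PySem.Chars.splitOn s [c] = List.splitOnP (· == c) s := by
  rw [PySem.Chars.splitOn, pvSplitGo c (s.length + 1) s [] [] (by omega)]
  obtain ⟨x, xs, hx⟩ := List.exists_cons_of_ne_nil (List.splitOnP_ne_nil (· == c) s)
  simp [hx]

-- no fragment of splitOnP contains the separator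
theorem pvNoSep (c : Char) : ∀ (l : List Char), ∀ f ∈ List.splitOnP (· == c) l, c ∉ f := by
  intro l
  induction l with
  | nil => simp [List.splitOnP_nil]
  | cons a t ih =>
    intro f hf
    rw [List.splitOnP_cons] at hf
    by_cases hac : a = c
    · simp [hac] at hf
      rcases hf with h | h
      · simp [h]
      · exact ih f h
    · obtain ⟨x, xs, hx⟩ := List.exists_cons_of_ne_nil (List.splitOnP_ne_nil (· == c) t)
      simp [hac, hx] at hf
      rcases hf with h | h
      · subst h
        have := ih x (by simp [hx])
        simp [this, Ne.symm hac]
      · exact ih f (by simp [hx, h])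

-- intercalate over a cons as a flatMap
theorem pvIntercalate (c : Char) (f : List Char) (rest : List (List Char)) :
    List.intercalate [c] (f :: rest) = f ++ rest.flatMap (fun g => c :: g) := by
  induction rest generalizing f with
  | nil => simp [List.intercalate]
  | cons g rs ih => simp [List.intercalate] at ih ⊢; simp [ih]

-- join of a snoc
theorem pvJoinSnoc (c : Char) (p : List (List Char)) (f : List Char) :
    List.intercalate [c] (p ++ [f]) = if p = [] then f else List.intercalate [c] p ++ c :: f := by
  induction p with
  | nil => simp [List.intercalate]
  | cons g rs ih =>
    rw [List.cons_append, pvIntercalate, pvIntercalate]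
    simp only [List.cons_ne_nil, if_false]
    cases rs <;> simp_all [pvIntercalate]

-- A's fold over a comma-free fragment appends it and adds its balance
theorem pvFoldFrag : ∀ (f : List Char) (parts : List (List Char)) (part : List Char) (d : Int),
    ',' ∉ f →
    List.foldl pvStepA (parts, part, d) f
      = (parts, part ++ f, d + ((f.count '(' : Int) - (f.count ')' : Int))) := by
  intro f
  induction f with
  | nil => simp
  | cons a t ih =>
    intro parts part d hf
    have hat : ',' ∉ t := fun h => hf (List.mem_cons_of_mem a h)
    have ha : a ≠ ',' := fun h => hf (h ▸ List.mem_cons_self)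
    simp only [List.foldl_cons]
    by_cases h1 : a = '('
    · subst h1
      rw [show pvStepA (parts, part, d) '(' = (parts, part ++ ['('], d + 1) from rfl]
      rw [ih parts (part ++ ['(']) (d + 1) hat]
      simp; omega
    · by_cases h2 : a = ')'
      · subst h2
        rw [show pvStepA (parts, part, d) ')' = (parts, part ++ [')'], d - 1) from rfl]
        rw [ih parts (part ++ [')']) (d - 1) hat]
        simp; omega
      · rw [show pvStepA (parts, part, d) a = (parts, part ++ [a], d) by
          simp [pvStepA, h1, h2, ha]]
        rw [ih parts (part ++ [a]) d hat]
        simp [h1, h2]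

-- main correspondence: A over the re-interleaved input vs B over the fragments
theorem pvMain : ∀ (rest : List (List Char)) (f : List Char) (parts pending : List (List Char)) (d : Int),
    ',' ∉ f → (∀ g ∈ rest, ',' ∉ g) → (pending = [] ↔ d = 0) →
    pvFinA (List.foldl pvStepA
        (parts, (if pending = [] then [] else PySem.Chars.join [','] pending ++ [',']), d)
        (f ++ rest.flatMap (fun g => ',' :: g)))
      = pvFinB (List.foldl pvStepB (parts, pending, d) (f :: rest)) := by
  intro rest
  induction rest with
  | nil =>
    intro f parts pending d hf _ hinv
    have hpart : (if pending = [] then ([] : List Char) else PySem.Chars.join [','] pending ++ [','])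
        ++ f = PySem.Chars.join [','] (pending ++ [f]) := by
      simp only [PySem.Chars.join, pvJoinSnoc]
      split_ifs with h <;> simp
    simp only [List.flatMap_nil, List.append_nil, List.foldl_cons, List.foldl_nil]
    rw [pvFoldFrag f parts _ d hf, hpart]
    rw [show pvStepB (parts, pending, d) f
        = (if d + ((f.count '(' : Int) - (f.count ')' : Int)) = 0
            then (parts ++ [PySem.Chars.join [','] (pending ++ [f])], ([] : List (List Char)),
              d + ((f.count '(' : Int) - (f.count ')' : Int)))
            else (parts, pending ++ [f], d + ((f.count '(' : Int) - (f.count ')' : Int)))) by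
      simp only [pvStepB, pvCountSingle]; split_ifs with h h' h' <;> simp_all <;> omega]
    split_ifs with h
    · simp [pvFinA, pvFinB]
    · simp [pvFinA, pvFinB]
  | cons g rs ih =>
    intro f parts pending d hf hrest hinv
    have hg : ',' ∉ g := hrest g List.mem_cons_self
    have hrs : ∀ x ∈ rs, ',' ∉ x := fun x hx => hrest x (List.mem_cons_of_mem g hx)
    have hpart : (if pending = [] then ([] : List Char) else PySem.Chars.join [','] pending ++ [','])
        ++ f = PySem.Chars.join [','] (pending ++ [f]) := by
      simp only [PySem.Chars.join, pvJoinSnoc]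
      split_ifs with h <;> simp
    simp only [List.flatMap_cons, List.foldl_cons, List.cons_append, List.foldl_append]
    rw [pvFoldFrag f parts _ d hf, hpart]
    rw [show pvStepB (parts, pending, d) f
        = (if d + ((f.count '(' : Int) - (f.count ')' : Int)) = 0
            then (parts ++ [PySem.Chars.join [','] (pending ++ [f])], ([] : List (List Char)),
              d + ((f.count '(' : Int) - (f.count ')' : Int)))
            else (parts, pending ++ [f], d + ((f.count '(' : Int) - (f.count ')' : Int)))) by
      simp only [pvStepB, pvCountSingle]; split_ifs with h h' h' <;> simp_all <;> omega]
    by_cases h : d + ((f.count '(' : Int) - (f.count ')' : Int)) = 0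
    · rw [if_pos h]
      rw [show pvStepA (parts, PySem.Chars.join [','] (pending ++ [f]),
            d + ((f.count '(' : Int) - (f.count ')' : Int))) ','
          = (parts ++ [PySem.Chars.join [','] (pending ++ [f])], ([] : List Char), 0) by
        simp [pvStepA, h]]
      rw [h]
      have := ih g (parts ++ [PySem.Chars.join [','] (pending ++ [f])]) [] 0 hg hrs (by simp)
      simp only [List.foldl_append, List.foldl_cons] at this
      simpa using this
    · rw [if_neg h]
      rw [show pvStepA (parts, PySem.Chars.join [','] (pending ++ [f]),
            d + ((f.count '(' : Int) - (f.count ')' : Int))) ','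
          = (parts, PySem.Chars.join [','] (pending ++ [f]) ++ [','],
             d + ((f.count '(' : Int) - (f.count ')' : Int))) by
        simp [pvStepA, h]]
      have := ih g parts (pending ++ [f])
        (d + ((f.count '(' : Int) - (f.count ')' : Int))) hg hrs
        (by constructor <;> intro hh <;> simp_all)
      simp only [List.foldl_append, List.foldl_cons, if_neg (by simp : ¬pending ++ [f] = [])] at this
      simpa using this

-- ===== VERDICT (by name: the statement is the Claim_ definition above) =====
theorem parse_typestring_spec : Claim_equal_parse_typestring := by
  unfold Claim_equal_parse_typestring Spec_parse_typestring
  intro ts _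
  unfold parse_typestring parse_typestring_alt
  by_cases hts : ts = "()"
  · simp [hts]
  · simp only [if_neg hts]
    rw [pvSplitSingle]
    obtain ⟨f, rest, hx⟩ := List.exists_cons_of_ne_nil
      (List.splitOnP_ne_nil (· == ',') (PySem.Str.slice ts (some 1) (some (-1))).toList)
    have hdecomp : (PySem.Str.slice ts (some 1) (some (-1))).toList
        = f ++ rest.flatMap (fun g => ',' :: g) := by
      conv_lhs => rw [← List.intercalate_splitOn (xs := (PySem.Str.slice ts (some 1) (some (-1))).toList) ',']
      rw [show (PySem.Str.slice ts (some 1) (some (-1))).toList.splitOn ','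
          = List.splitOnP (· == ',') (PySem.Str.slice ts (some 1) (some (-1))).toList from rfl,
        hx, pvIntercalate]
    have hf : ',' ∉ f := pvNoSep ',' _ f (hx ▸ List.mem_cons_self)
    have hrest : ∀ g ∈ rest, ',' ∉ g := fun g hg =>
      pvNoSep ',' _ g (hx ▸ List.mem_cons_of_mem f hg)
    have hmain := pvMain rest f [] [] 0 hf hrest (by simp)
    simp only [reduceIte] at hmain
    rw [hx, hdecomp]
    unfold pvFinA pvFinB at hmain
    rw [hmain]
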